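-- pv_equiv track=rewrite | github.com/EriherSizac/Improving-deep-neural-networks-to-identify-mental-disorders-using-Neural-Architecture-Search | D3T3C/D3TEC Dataset/utils.py | select_group_for_repetition
-- ===== SOURCE A (Python) =====
-- def select_group_for_repetition(layers, repetition_layers):
--     """
--     Selecciona el primer grupo válido para repetición en función de las reglas de compatibilidad.
--
--     Parameters:
--         layers (list): Lista de capas ya procesadas, donde cada capa es un diccionario.
--         repetition_layers (int): Número de capas hacia atrás para considerar en la repetición.
--
--     Returns:
--         list: Lista de capas compatibles para repetición.
--     """
--     valid_layers = []
--     group_type = None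
--
--     # Retrocede desde el final de `layers` para encontrar el grupo válido
--     for layer in reversed(layers[-repetition_layers:]):
--         if group_type is None:
--             # Determina el tipo de grupo
--             if layer['type'] in ['Flatten', 'Dense']:
--                 group_type = 'dense'
--                 valid_layers.insert(0, layer)
--             elif layer['type'] in ['Conv2D', 'DepthwiseConv2D', 'MaxPooling']:
--                 group_type = 'convolutional'
--                 valid_layers.insert(0, layer)
--             elif layer['type'] in ['BatchNorm', 'DontCare']:  # BatchNorm y DontCare son compatibles con ambos grupos
--                 valid_layers.insert(0, layer)
--         else:
--             # Agrega solo capas compatibles con el grupo seleccionado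
--             if group_type == 'dense' and layer['type'] in ['Flatten', 'Dense', 'BatchNorm', 'DontCare']:
--                 valid_layers.insert(0, layer)
--             elif group_type == 'convolutional' and layer['type'] in ['Conv2D', 'DepthwiseConv2D', 'MaxPooling', 'BatchNorm', 'DontCare']:
--                 valid_layers.insert(0, layer)
--
--     return valid_layers
-- ===== SOURCE B (Python) =====
-- def select_group_for_repetition(layers, repetition_layers):
--     """Two-pass rewrite: resolve the group type first, then filter the window once."""
--     window = layers[-repetition_layers:]
--     group_type = None
--     for layer in reversed(window):
--         t = layer['type']
--         if t in ('Flatten', 'Dense'):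
--             group_type = 'dense'
--             break
--         if t in ('Conv2D', 'DepthwiseConv2D', 'MaxPooling'):
--             group_type = 'convolutional'
--             break
--
--     def compatible(t):
--         if t in ('BatchNorm', 'DontCare'):
--             return True
--         if group_type == 'dense':
--             return t in ('Flatten', 'Dense')
--         if group_type == 'convolutional':
--             return t in ('Conv2D', 'DepthwiseConv2D', 'MaxPooling')
--         return False
--
--     return [layer for layer in window if compatible(layer['type'])]
-- ===== Notes on version B (the rewrite author's own statement) =====
-- stated objective: simpler
-- what changed: Instead of one reverse pass that interleaves group detection with building the result by insert(0) under a two-state machine, B first resolves the group type with a short reverse scan that stops at the first defining layer, then keeps the window's compatible layers with a single forward comprehension (no insert(0), no per-layer state).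
import Mathlib
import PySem

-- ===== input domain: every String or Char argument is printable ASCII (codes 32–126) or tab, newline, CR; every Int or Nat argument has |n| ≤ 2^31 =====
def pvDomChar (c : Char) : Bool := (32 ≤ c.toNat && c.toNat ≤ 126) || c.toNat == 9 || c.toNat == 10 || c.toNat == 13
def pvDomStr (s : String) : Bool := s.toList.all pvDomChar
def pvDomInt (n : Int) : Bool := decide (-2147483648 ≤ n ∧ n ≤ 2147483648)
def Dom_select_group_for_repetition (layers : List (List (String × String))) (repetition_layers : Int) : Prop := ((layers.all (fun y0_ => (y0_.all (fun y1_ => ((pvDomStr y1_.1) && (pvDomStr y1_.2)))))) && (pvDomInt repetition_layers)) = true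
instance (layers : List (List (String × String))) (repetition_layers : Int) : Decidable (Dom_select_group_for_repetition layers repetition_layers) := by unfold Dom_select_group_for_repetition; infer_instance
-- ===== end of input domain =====

-- B resolves the group type with its own reverse scan and then keeps compatible
-- layers with a single forward filter, replacing A's stateful reverse loop with
-- insert(0); objective: simpler. Pre_ excludes windows with a layer lacking a
-- 'type' key, where the Python raises KeyError.


-- layer['type'] as a dict lookup (first match; none = KeyError, excluded by Pre_)
def pvLayerType (layer : List (String × String)) : Option String :=
  (PySem.Dict.mk layer).get? "type"

-- ===== PORT A =====
-- one step of A's loop: state = (valid_layers, group_type)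
def pvAStep (st : List (List (String × String)) × Option String)
    (layer : List (String × String)) :
    List (List (String × String)) × Option String :=
  let t := pvLayerType layer
  match st.2 with
  | none =>
    if t = some "Flatten" ∨ t = some "Dense" then
      (layer :: st.1, some "dense")
    else if t = some "Conv2D" ∨ t = some "DepthwiseConv2D" ∨ t = some "MaxPooling" then
      (layer :: st.1, some "convolutional")
    else if t = some "BatchNorm" ∨ t = some "DontCare" then
      (layer :: st.1, none)
    else st
  | some g =>
    if g = "dense" ∧ (t = some "Flatten" ∨ t = some "Dense" ∨ t = some "BatchNorm" ∨ t = some "DontCare") then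
      (layer :: st.1, st.2)
    else if g = "convolutional" ∧ (t = some "Conv2D" ∨ t = some "DepthwiseConv2D" ∨ t = some "MaxPooling" ∨ t = some "BatchNorm" ∨ t = some "DontCare") then
      (layer :: st.1, st.2)
    else st

def select_group_for_repetition (layers : List (List (String × String))) (repetition_layers : Int) : List (List (String × String)) :=
  (((PySem.List.slice layers (some (-repetition_layers)) none).reverse).foldl pvAStep ([], none)).1

-- ===== PORT B =====
-- first pass: first defining layer of the reversed window decides the group
def pvFindGroup : List (List (String × String)) → Option String
  | [] => none
  | layer :: rest =>
    let t := pvLayerType layer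
    if t = some "Flatten" ∨ t = some "Dense" then some "dense"
    else if t = some "Conv2D" ∨ t = some "DepthwiseConv2D" ∨ t = some "MaxPooling" then some "convolutional"
    else pvFindGroup rest

def pvCompatible (group : Option String) (t : Option String) : Bool :=
  if t = some "BatchNorm" ∨ t = some "DontCare" then true
  else if group = some "dense" then decide (t = some "Flatten" ∨ t = some "Dense")
  else if group = some "convolutional" then decide (t = some "Conv2D" ∨ t = some "DepthwiseConv2D" ∨ t = some "MaxPooling")
  else false

def select_group_for_repetition_alt (layers : List (List (String × String))) (repetition_layers : Int) : List (List (String × String)) :=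
  let window := PySem.List.slice layers (some (-repetition_layers)) none
  let group := pvFindGroup window.reverse
  window.filter (fun layer => pvCompatible group (pvLayerType layer))

-- ===== PRECONDITION & SPEC =====
-- Pre_: every layer of the sliced window carries a 'type' key (otherwise the Python raises KeyError)
def Pre_select_group_for_repetition (layers : List (List (String × String))) (repetition_layers : Int) : Prop :=
  ∀ layer ∈ PySem.List.slice layers (some (-repetition_layers)) none, (pvLayerType layer).isSome = true
instance (layers : List (List (String × String))) (repetition_layers : Int) : Decidable (Pre_select_group_for_repetition layers repetition_layers) := by unfold Pre_select_group_for_repetition; infer_instance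

def pvWitness_select_group_for_repetition : (List (List (String × String))) × Int :=
  ([[("type", "Conv2D")], [("type", "BatchNorm")], [("type", "Dense")]], 2)

def Spec_select_group_for_repetition (layers : List (List (String × String))) (repetition_layers : Int) (out : List (List (String × String))) : Prop := out = select_group_for_repetition_alt layers repetition_layers
instance (layers : List (List (String × String))) (repetition_layers : Int) (out : List (List (String × String))) : Decidable (Spec_select_group_for_repetition layers repetition_layers out) := by unfold Spec_select_group_for_repetition; infer_instance

-- ===== CLAIM (what is proved, stated in full; the proofs are below) =====
def Claim_equal_select_group_for_repetition : Prop := ∀ (layers : List (List (String × String))) (repetition_layers : Int), Dom_select_group_for_repetition layers repetition_layers → Pre_select_group_for_repetition layers repetition_layers → Spec_select_group_for_repetition layers repetition_layers (select_group_for_repetition layers repetition_layers)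

-- ===== LEMMAS AND PROOFS =====

-- once the group is fixed, A's loop keeps exactly the compatible layers
theorem pvFoldl_some (r : List (List (String × String)))
    (acc : List (List (String × String))) (g : String)
    (hg : g = "dense" ∨ g = "convolutional") :
    r.foldl pvAStep (acc, some g) =
      ((r.filter (fun layer => pvCompatible (some g) (pvLayerType layer))).reverse ++ acc, some g) := by
  induction r generalizing acc with
  | nil => simp
  | cons l rest ih =>
    have hstep : pvAStep (acc, some g) l =
        (if pvCompatible (some g) (pvLayerType l) then l :: acc else acc, some g) := by
      rcases hg with hg | hg <;> subst hg <;>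
        simp only [pvAStep, pvCompatible] <;> split_ifs <;> simp_all
    rw [List.foldl_cons, hstep, List.filter_cons]
    by_cases hc : pvCompatible (some g) (pvLayerType l) = true
    · rw [if_pos hc, if_pos hc, ih (l :: acc)]; simp
    · rw [if_neg hc, if_neg hc, ih acc]

-- A's loop from the initial state computes B's filter for B's resolved group
theorem pvFoldl_none (r : List (List (String × String)))
    (acc : List (List (String × String))) :
    (r.foldl pvAStep (acc, none)).1 =
      (r.filter (fun layer => pvCompatible (pvFindGroup r) (pvLayerType layer))).reverse ++ acc := by
  induction r generalizing acc with
  | nil => simp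
  | cons l rest ih =>
    rw [List.foldl_cons]
    by_cases h1 : pvLayerType l = some "Flatten" ∨ pvLayerType l = some "Dense"
    · have hstep : pvAStep (acc, none) l = (l :: acc, some "dense") := by
        simp [pvAStep, h1]
      have hfg : pvFindGroup (l :: rest) = some "dense" := by
        simp [pvFindGroup, h1]
      have hc : pvCompatible (some "dense") (pvLayerType l) = true := by
        simp only [pvCompatible]; rcases h1 with h | h <;> simp [h]
      rw [hstep, pvFoldl_some rest (l :: acc) "dense" (Or.inl rfl), hfg,
        List.filter_cons, if_pos hc]
      simp
    · by_cases h2 : pvLayerType l = some "Conv2D" ∨ pvLayerType l = some "DepthwiseConv2D" ∨ pvLayerType l = some "MaxPooling"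
      · have hstep : pvAStep (acc, none) l = (l :: acc, some "convolutional") := by
          simp [pvAStep, h1, h2]
        have hfg : pvFindGroup (l :: rest) = some "convolutional" := by
          simp [pvFindGroup, h1, h2]
        have hc : pvCompatible (some "convolutional") (pvLayerType l) = true := by
          simp only [pvCompatible]
          rcases h2 with h | h | h <;> simp [h]
        rw [hstep, pvFoldl_some rest (l :: acc) "convolutional" (Or.inr rfl), hfg,
          List.filter_cons, if_pos hc]
        simp
      · have hfg : pvFindGroup (l :: rest) = pvFindGroup rest := by
          simp [pvFindGroup, h1, h2]
        by_cases h3 : pvLayerType l = some "BatchNorm" ∨ pvLayerType l = some "DontCare"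
        · have hstep : pvAStep (acc, none) l = (l :: acc, none) := by
            simp [pvAStep, h1, h2, h3]
          have hc : pvCompatible (pvFindGroup rest) (pvLayerType l) = true := by
            simp only [pvCompatible, h3, if_pos]
          rw [hstep, ih (l :: acc), hfg, List.filter_cons, if_pos hc]
          simp
        · have hstep : pvAStep (acc, none) l = (acc, none) := by
            simp [pvAStep, h1, h2, h3]
          have hc : pvCompatible (pvFindGroup rest) (pvLayerType l) = false := by
            simp only [pvCompatible, h1, h2, h3]
            split_ifs with hd hcv <;> simp_all
          rw [hstep, ih acc, hfg, List.filter_cons, if_neg (by simp [hc])]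

-- ===== VERDICT (by name: the statement is the Claim_ definition above) =====
theorem select_group_for_repetition_spec : Claim_equal_select_group_for_repetition := by
  intro layers repetition_layers _ _
  unfold Spec_select_group_for_repetition select_group_for_repetition select_group_for_repetition_alt
  rw [pvFoldl_none]
  simp [List.filter_reverse]
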